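-- pv_equiv track=rewrite | github.com/dwainm/bellafruita | io_mapping.py | get_address
-- ===== SOURCE A (Python) =====
-- MODBUS_MAP = {
--     'INPUT': {
--         'coils': {
--             0: {'label': 'S1', 'description': 'Sensor Conveyor 1'},
--             1: {'label': 'S2', 'description': 'Sensor Conveyor 2'},
--             2: {'label': 'CS1', 'description': 'Crate Height Sensor 1'},
--             3: {'label': 'CS2', 'description': 'Crate Height Sensor 2'},
--             4: {'label': 'CS3', 'description': 'Crate Height Sensor 3'},
--             5: {'label': 'M1_Trip', 'description': 'Conveyor 1 Motor Drive Trip'},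
--             6: {'label': 'M2_Trip', 'description': 'Conveyor 2 Motor Drive Trip'},
--             7: {'label': 'E_Stop', 'description': 'Emergency Stop Button'},
--             8: {'label': 'Manual_Select', 'description': 'Selector Switch Manual'},
--             9: {'label': 'Auto_Select', 'description': 'Selector Switch Auto'},
--             10: {'label': 'Klaar_Geweeg_Btn', 'description': 'Klaar Geweeg Button (Ready Weighed)'},
--             11: {'label': 'CPS_1', 'description': 'Crate position sensor 1'},
--             12: {'label': 'CPS_2', 'description': 'Crate position sensor 2'},
--             13: {'label': 'Reset_Btn', 'description': 'System Reset Button'},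
--             14: {'label': 'PALM_Run_Signal', 'description': 'PALM Chemtrack Run Signal'},
--             15: {'label': 'DHLM_Trip_Signal', 'description': 'DHLM Chemtrack Trip Signal'},
--         },
--         'registers': {
--             # Input module holding registers (if any)
--         }
--     },
--     'OUTPUT': {
--         'coils': {
--             0: {'label': 'LED_GREEN', 'description': 'Comms indicator light.'},
--             1: {'label': 'MOTOR_2', 'description': 'Conveyor 2 Motor'},
--             2: {'label': 'MOTOR_3', 'description': 'Conveyor 3 Motor'},
--             3: {'label': 'LED_RED', 'description': 'Create position indicator light.'},
--         },
--         'registers': {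
--             0: {'label': 'VERSION', 'description': 'Firmware Version Number'},
--         }
--     }
-- }
--
-- def get_address(device: str, label: str, reg_type: str = None):
--     """Get Modbus address for a given device and label.
--
--     Args:
--         device: 'INPUT' or 'OUTPUT'
--         label: Label like 'S1', 'MOTOR_1', 'VERSION' (case-insensitive)
--         reg_type: 'coils' or 'registers' (optional, will search both if not specified)
--
--     Returns:
--         tuple: (address, reg_type) or (None, None) if not found
--
--     Example:
--         >>> get_address('INPUT', 's1')
--         (0, 'coils')
--         >>> get_address('OUTPUT', 'version')
--         (0, 'registers')
--     """
--     device = device.upper()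
--     label = label.upper()
--
--     if device not in MODBUS_MAP:
--         return None, None
--
--     # Search in specified type only
--     if reg_type:
--         for addr, info in MODBUS_MAP[device][reg_type].items():
--             if info['label'].upper() == label:
--                 return addr, reg_type
--         return None, None
--
--     # Search in both coils and registers
--     for rtype in ['coils', 'registers']:
--         for addr, info in MODBUS_MAP[device].get(rtype, {}).items():
--             if info['label'].upper() == label:
--                 return addr, rtype
--
--     return None, None
-- ===== SOURCE B (Python) =====
-- MODBUS_MAP = {
--     'INPUT': {
--         'coils': {
--             0: {'label': 'S1', 'description': 'Sensor Conveyor 1'},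
--             1: {'label': 'S2', 'description': 'Sensor Conveyor 2'},
--             2: {'label': 'CS1', 'description': 'Crate Height Sensor 1'},
--             3: {'label': 'CS2', 'description': 'Crate Height Sensor 2'},
--             4: {'label': 'CS3', 'description': 'Crate Height Sensor 3'},
--             5: {'label': 'M1_Trip', 'description': 'Conveyor 1 Motor Drive Trip'},
--             6: {'label': 'M2_Trip', 'description': 'Conveyor 2 Motor Drive Trip'},
--             7: {'label': 'E_Stop', 'description': 'Emergency Stop Button'},
--             8: {'label': 'Manual_Select', 'description': 'Selector Switch Manual'},
--             9: {'label': 'Auto_Select', 'description': 'Selector Switch Auto'},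
--             10: {'label': 'Klaar_Geweeg_Btn', 'description': 'Klaar Geweeg Button (Ready Weighed)'},
--             11: {'label': 'CPS_1', 'description': 'Crate position sensor 1'},
--             12: {'label': 'CPS_2', 'description': 'Crate position sensor 2'},
--             13: {'label': 'Reset_Btn', 'description': 'System Reset Button'},
--             14: {'label': 'PALM_Run_Signal', 'description': 'PALM Chemtrack Run Signal'},
--             15: {'label': 'DHLM_Trip_Signal', 'description': 'DHLM Chemtrack Trip Signal'},
--         },
--         'registers': {}
--     },
--     'OUTPUT': {
--         'coils': {
--             0: {'label': 'LED_GREEN', 'description': 'Comms indicator light.'},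
--             1: {'label': 'MOTOR_2', 'description': 'Conveyor 2 Motor'},
--             2: {'label': 'MOTOR_3', 'description': 'Conveyor 3 Motor'},
--             3: {'label': 'LED_RED', 'description': 'Create position indicator light.'},
--         },
--         'registers': {
--             0: {'label': 'VERSION', 'description': 'Firmware Version Number'},
--         }
--     }
-- }
--
-- # Reverse-lookup index built once: (device, reg_type, UPPER(label)) -> first address.
-- _INDEX = {}
-- for _dev, _groups in MODBUS_MAP.items():
--     for _rt in ('coils', 'registers'):
--         for _addr, _info in _groups.get(_rt, {}).items():
--             _INDEX.setdefault((_dev, _rt, _info['label'].upper()), _addr)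
--
--
-- def get_address(device: str, label: str, reg_type: str = None):
--     device = device.upper()
--     label = label.upper()
--     if device not in MODBUS_MAP:
--         return None, None
--     rtypes = (reg_type,) if reg_type else ('coils', 'registers')
--     for rt in rtypes:
--         addr = _INDEX.get((device, rt, label))
--         if addr is not None:
--             return addr, rt
--     return None, None
-- ===== Notes on version B (the rewrite author's own statement) =====
-- stated objective: simpler
-- what changed: B replaces A's per-call linear scans over the nested MODBUS_MAP with a reverse-lookup dict built once, keyed (device, reg_type, uppercased label) in coils-then-registers insertion order, so get_address is a couple of keyed lookups.
import Mathlib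
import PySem

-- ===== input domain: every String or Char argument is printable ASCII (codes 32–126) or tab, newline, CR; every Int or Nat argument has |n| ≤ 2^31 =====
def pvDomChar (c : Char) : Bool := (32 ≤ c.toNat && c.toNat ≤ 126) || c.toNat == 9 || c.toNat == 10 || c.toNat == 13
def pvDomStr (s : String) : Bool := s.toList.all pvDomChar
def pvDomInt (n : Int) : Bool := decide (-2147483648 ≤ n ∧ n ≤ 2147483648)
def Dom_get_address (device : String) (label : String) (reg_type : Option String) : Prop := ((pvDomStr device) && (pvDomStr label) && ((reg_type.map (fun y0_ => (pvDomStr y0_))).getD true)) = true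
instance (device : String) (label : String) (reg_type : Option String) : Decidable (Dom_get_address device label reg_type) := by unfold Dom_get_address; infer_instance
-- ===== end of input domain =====

-- B builds a reverse-lookup dict (device, reg_type, uppercased label) -> addr once, so
-- get_address becomes keyed lookups instead of A's per-call linear scans (objective: simpler).

-- ===== PORT A =====
-- shared data: MODBUS_MAP's groups as (address, label) lists; the unused 'description'
-- fields are dropped (neither program reads them).
def coilsINPUT : List (Int × String) :=
  [(0, "S1"), (1, "S2"), (2, "CS1"), (3, "CS2"), (4, "CS3"), (5, "M1_Trip"),
   (6, "M2_Trip"), (7, "E_Stop"), (8, "Manual_Select"), (9, "Auto_Select"),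
   (10, "Klaar_Geweeg_Btn"), (11, "CPS_1"), (12, "CPS_2"), (13, "Reset_Btn"),
   (14, "PALM_Run_Signal"), (15, "DHLM_Trip_Signal")]
def registersINPUT : List (Int × String) := []
def coilsOUTPUT : List (Int × String) :=
  [(0, "LED_GREEN"), (1, "MOTOR_2"), (2, "MOTOR_3"), (3, "LED_RED")]
def registersOUTPUT : List (Int × String) := [(0, "VERSION")]

def modbusGroup (device rt : String) : List (Int × String) :=
  if device = "INPUT" then (if rt = "coils" then coilsINPUT else registersINPUT)
  else (if rt = "coils" then coilsOUTPUT else registersOUTPUT)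

-- A's inner loop: first entry whose uppercased label equals the (already uppercased) label
def findLabel (xs : List (Int × String)) (label : String) : Option Int :=
  match xs with
  | [] => none
  | (a, l) :: rest => if PySem.Str.upper l = label then some a else findLabel rest label

-- A's fallback loop over ['coils', 'registers']
def searchBoth (device label : String) : Option Int × Option String :=
  match findLabel (modbusGroup device "coils") label with
  | some a => (some a, some "coils")
  | none =>
    match findLabel (modbusGroup device "registers") label with
    | some a => (some a, some "registers")
    | none => (none, none)

def get_address (device : String) (label : String) (reg_type : Option String) : Option Int × Option String :=
  let device := PySem.Str.upper device
  let label := PySem.Str.upper label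
  if device ≠ "INPUT" ∧ device ≠ "OUTPUT" then (none, none)
  else
    match reg_type with
    | some rt =>
      if rt ≠ "" then
        -- Pre_ guarantees rt ∈ {coils, registers} here; Python raises KeyError otherwise
        match findLabel (modbusGroup device rt) label with
        | some a => (some a, some rt)
        | none => (none, none)
      else searchBoth device label
    | none => searchBoth device label

-- ===== PORT B =====
-- the module-level reverse index: setdefault((dev, rt, label.upper()), addr) over the map
-- in device order, coils then registers
def pvIndex : PySem.Dict (String × String × String) Int :=
  (["INPUT", "OUTPUT"]).foldl (fun d dev =>
    (["coils", "registers"]).foldl (fun d rt =>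
      (modbusGroup dev rt).foldl (fun d p =>
        PySem.Dict.setdefault d (dev, rt, PySem.Str.upper p.2) p.1) d) d) PySem.Dict.empty

-- B's loop over rtypes: keyed lookups, first hit wins
def lookupRtypes (rtypes : List String) (device label : String) : Option Int × Option String :=
  match rtypes with
  | [] => (none, none)
  | rt :: rest =>
    match PySem.Dict.get? pvIndex (device, rt, label) with
    | some a => (some a, some rt)
    | none => lookupRtypes rest device label

def get_address_alt (device : String) (label : String) (reg_type : Option String) : Option Int × Option String :=
  let device := PySem.Str.upper device
  let label := PySem.Str.upper label
  if device ≠ "INPUT" ∧ device ≠ "OUTPUT" then (none, none)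
  else
    let rtypes := match reg_type with
      | some rt => if rt ≠ "" then [rt] else ["coils", "registers"]
      | none => ["coils", "registers"]
    lookupRtypes rtypes device label

-- ===== PRECONDITION & SPEC =====
-- Pre_ excludes exactly the inputs on which A raises KeyError: device (uppercased) present
-- in MODBUS_MAP together with a truthy reg_type other than "coils"/"registers".
def Pre_get_address (device : String) (label : String) (reg_type : Option String) : Prop :=
  (PySem.Str.upper device ≠ "INPUT" ∧ PySem.Str.upper device ≠ "OUTPUT") ∨
  reg_type = none ∨ reg_type = some "" ∨ reg_type = some "coils" ∨ reg_type = some "registers"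
instance (device : String) (label : String) (reg_type : Option String) : Decidable (Pre_get_address device label reg_type) := by unfold Pre_get_address; infer_instance

def pvWitness_get_address : String × String × Option String := ("INPUT", "s1", none)

def Spec_get_address (device : String) (label : String) (reg_type : Option String) (out : Option Int × Option String) : Prop := out = get_address_alt device label reg_type
instance (device : String) (label : String) (reg_type : Option String) (out : Option Int × Option String) : Decidable (Spec_get_address device label reg_type out) := by unfold Spec_get_address; infer_instance

-- ===== CLAIM (what is proved, stated in full; the proofs are below) =====
def Claim_equal_get_address : Prop := ∀ (device : String) (label : String) (reg_type : Option String), Dom_get_address device label reg_type → Pre_get_address device label reg_type → Spec_get_address device label reg_type (get_address device label reg_type)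

-- ===== LEMMAS AND PROOFS =====

-- uppercase of each stored label, as rewrite rules
theorem upLit0 : PySem.Str.upper "S1" = "S1" := by decide
theorem upLit1 : PySem.Str.upper "S2" = "S2" := by decide
theorem upLit2 : PySem.Str.upper "CS1" = "CS1" := by decide
theorem upLit3 : PySem.Str.upper "CS2" = "CS2" := by decide
theorem upLit4 : PySem.Str.upper "CS3" = "CS3" := by decide
theorem upLit5 : PySem.Str.upper "M1_Trip" = "M1_TRIP" := by decide
theorem upLit6 : PySem.Str.upper "M2_Trip" = "M2_TRIP" := by decide
theorem upLit7 : PySem.Str.upper "E_Stop" = "E_STOP" := by decide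
theorem upLit8 : PySem.Str.upper "Manual_Select" = "MANUAL_SELECT" := by decide
theorem upLit9 : PySem.Str.upper "Auto_Select" = "AUTO_SELECT" := by decide
theorem upLit10 : PySem.Str.upper "Klaar_Geweeg_Btn" = "KLAAR_GEWEEG_BTN" := by decide
theorem upLit11 : PySem.Str.upper "CPS_1" = "CPS_1" := by decide
theorem upLit12 : PySem.Str.upper "CPS_2" = "CPS_2" := by decide
theorem upLit13 : PySem.Str.upper "Reset_Btn" = "RESET_BTN" := by decide
theorem upLit14 : PySem.Str.upper "PALM_Run_Signal" = "PALM_RUN_SIGNAL" := by decide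
theorem upLit15 : PySem.Str.upper "DHLM_Trip_Signal" = "DHLM_TRIP_SIGNAL" := by decide
theorem upLit16 : PySem.Str.upper "LED_GREEN" = "LED_GREEN" := by decide
theorem upLit17 : PySem.Str.upper "MOTOR_2" = "MOTOR_2" := by decide
theorem upLit18 : PySem.Str.upper "MOTOR_3" = "MOTOR_3" := by decide
theorem upLit19 : PySem.Str.upper "LED_RED" = "LED_RED" := by decide
theorem upLit20 : PySem.Str.upper "VERSION" = "VERSION" := by decide

theorem get?_mk_nil' {κ ν : Type} [BEq κ] (k : κ) : (PySem.Dict.mk ([] : List (κ × ν))).get? k = none := by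
  simp [PySem.Dict.get?]

-- pvIndex evaluated: the reverse index as a literal dict
theorem pvIndex_eq : pvIndex = PySem.Dict.mk [(("INPUT", "coils", "S1"), 0), (("INPUT", "coils", "S2"), 1), (("INPUT", "coils", "CS1"), 2), (("INPUT", "coils", "CS2"), 3), (("INPUT", "coils", "CS3"), 4), (("INPUT", "coils", "M1_TRIP"), 5), (("INPUT", "coils", "M2_TRIP"), 6), (("INPUT", "coils", "E_STOP"), 7), (("INPUT", "coils", "MANUAL_SELECT"), 8), (("INPUT", "coils", "AUTO_SELECT"), 9), (("INPUT", "coils", "KLAAR_GEWEEG_BTN"), 10), (("INPUT", "coils", "CPS_1"), 11), (("INPUT", "coils", "CPS_2"), 12), (("INPUT", "coils", "RESET_BTN"), 13), (("INPUT", "coils", "PALM_RUN_SIGNAL"), 14), (("INPUT", "coils", "DHLM_TRIP_SIGNAL"), 15), (("OUTPUT", "coils", "LED_GREEN"), 0), (("OUTPUT", "coils", "MOTOR_2"), 1), (("OUTPUT", "coils", "MOTOR_3"), 2), (("OUTPUT", "coils", "LED_RED"), 3), (("OUTPUT", "registers", "VERSION"), 0)] := by rfl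

-- A's linear scan agrees with B's keyed index lookup on every valid (device, rt) pair
theorem findLabel_eq_index (dev rt : String)
    (hdev : dev = "INPUT" ∨ dev = "OUTPUT") (hrt : rt = "coils" ∨ rt = "registers")
    (label : String) :
    findLabel (modbusGroup dev rt) label = PySem.Dict.get? pvIndex (dev, rt, label) := by
  rcases hdev with rfl | rfl <;> rcases hrt with rfl | rfl <;>
    simp [pvIndex_eq, modbusGroup, coilsINPUT, registersINPUT, coilsOUTPUT, registersOUTPUT,
      findLabel, PySem.Dict.get?_mk_cons, get?_mk_nil', beq_iff_eq, Prod.mk.injEq, upLit0, upLit1, upLit2, upLit3, upLit4, upLit5, upLit6, upLit7, upLit8, upLit9, upLit10, upLit11, upLit12, upLit13, upLit14, upLit15, upLit16, upLit17, upLit18, upLit19, upLit20]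

theorem searchBoth_eq (dev label : String) (hdev : dev = "INPUT" ∨ dev = "OUTPUT") :
    searchBoth dev label = lookupRtypes ["coils", "registers"] dev label := by
  simp only [searchBoth, lookupRtypes,
    findLabel_eq_index dev "coils" hdev (Or.inl rfl) label,
    findLabel_eq_index dev "registers" hdev (Or.inr rfl) label]

-- ===== VERDICT (by name: the statement is the Claim_ definition above) =====
theorem get_address_spec : Claim_equal_get_address := by
  intro device label reg_type _ hpre
  unfold Spec_get_address get_address get_address_alt
  by_cases hdev : PySem.Str.upper device ≠ "INPUT" ∧ PySem.Str.upper device ≠ "OUTPUT"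
  · simp [hdev]
  · have hdev' : PySem.Str.upper device = "INPUT" ∨ PySem.Str.upper device = "OUTPUT" := by
      tauto
    simp only [if_neg hdev]
    match reg_type with
    | none => exact searchBoth_eq _ _ hdev'
    | some rt =>
      rcases hpre with h | h | h | h | h
      · exact absurd h hdev
      · exact absurd h (by simp)
      · simp only [Option.some.injEq] at h; subst h
        simp [searchBoth_eq _ _ hdev']
      · simp only [Option.some.injEq] at h; subst h
        simp [lookupRtypes, findLabel_eq_index _ "coils" hdev' (Or.inl rfl)]
      · simp only [Option.some.injEq] at h; subst h
        simp [lookupRtypes, findLabel_eq_index _ "registers" hdev' (Or.inr rfl)]
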